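-- pv_equiv track=rewrite | github.com/dattilaa/Workshops | Практикум 16/task_1.py | is_plural
-- ===== SOURCE A (Python) =====
-- def is_plural(nums: list, n: int) -> bool:
--     """
--     Checking if n enters nums list more than one time
--     :param nums: numbers sequence
--     :param n: users number
--     :return: True, False
--     """
--     unique, duplicates = set(), set()
--     for num in nums:
--         if num in unique:
--             duplicates.add(num)
--         else:
--             unique.add(num)
--
--     return n in duplicates
-- ===== SOURCE B (Python) =====
-- def is_plural(nums: list, n: int) -> bool:
--     try:
--         i = nums.index(n)
--     except ValueError:
--         return False
--     return n in nums[i + 1:]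
-- ===== Notes on version B (the rewrite author's own statement) =====
-- stated objective: simpler
-- what changed: Instead of A's single pass tallying elements into seen-once/seen-twice hash sets, B performs two staged searches: locate the first occurrence of n with list.index and then test membership of n in the tail after that index; no per-element occurrence structure is built.
import Mathlib
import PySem

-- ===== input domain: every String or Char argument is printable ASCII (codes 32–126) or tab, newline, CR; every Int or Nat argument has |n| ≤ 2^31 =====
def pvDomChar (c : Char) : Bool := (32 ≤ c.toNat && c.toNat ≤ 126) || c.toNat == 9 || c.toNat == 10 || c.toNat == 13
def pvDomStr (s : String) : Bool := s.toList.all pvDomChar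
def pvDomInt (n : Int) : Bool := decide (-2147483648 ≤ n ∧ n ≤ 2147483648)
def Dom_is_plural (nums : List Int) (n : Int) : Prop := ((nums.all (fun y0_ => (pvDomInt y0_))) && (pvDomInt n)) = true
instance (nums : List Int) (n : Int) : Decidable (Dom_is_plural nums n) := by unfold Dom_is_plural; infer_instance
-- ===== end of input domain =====

-- B replaces A's tallying pass over two seen-once/seen-twice sets by two staged searches:
-- find the first index of n, then test membership in the tail after it (simpler).

-- ===== PORT A =====
-- A's loop body: if num in unique: duplicates.add(num) else: unique.add(num)
def is_pluralStep (p : PySem.Set Int × PySem.Set Int) (num : Int) :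
    PySem.Set Int × PySem.Set Int :=
  if PySem.Set.contains p.1 num then (p.1, PySem.Set.add p.2 num)
  else (PySem.Set.add p.1 num, p.2)

def is_plural (nums : List Int) (n : Int) : Bool :=
  PySem.Set.contains
    (nums.foldl is_pluralStep (PySem.Set.empty, PySem.Set.empty)).2 n

-- ===== PORT B =====
-- try: i = nums.index(n) except ValueError: return False; return n in nums[i+1:]
def is_plural_alt (nums : List Int) (n : Int) : Bool :=
  match PySem.List.index? nums n with
  | none => false
  | some i => (PySem.List.slice nums (some ((i : Int) + 1)) none).contains n

-- ===== PRECONDITION & SPEC =====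
def Spec_is_plural (nums : List Int) (n : Int) (out : Bool) : Prop := out = is_plural_alt nums n
instance (nums : List Int) (n : Int) (out : Bool) : Decidable (Spec_is_plural nums n out) := by unfold Spec_is_plural; infer_instance

-- ===== CLAIM (what is proved, stated in full; the proofs are below) =====
def Claim_equal_is_plural : Prop := ∀ (nums : List Int) (n : Int), Dom_is_plural nums n → Spec_is_plural nums n (is_plural nums n)

-- ===== LEMMAS AND PROOFS =====

theorem mem_iff_one_le_count (l : List Int) (n : Int) : n ∈ l ↔ 1 ≤ l.count n := by
  rw [← List.count_pos_iff]; omega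

theorem is_pluralStep_pos (u d : PySem.Set Int) (x : Int) (hx : x ∈ u) :
    is_pluralStep (u, d) x = (u, PySem.Set.add d x) := by
  simp [is_pluralStep, PySem.Set.contains, List.contains_eq_mem, hx]

theorem is_pluralStep_neg (u d : PySem.Set Int) (x : Int) (hx : x ∉ u) :
    is_pluralStep (u, d) x = (PySem.Set.add u x, d) := by
  simp [is_pluralStep, PySem.Set.contains, List.contains_eq_mem, hx]

-- invariant of A's loop
theorem is_plural_loop_inv (n : Int) :
    ∀ (nums : List Int) (u d : PySem.Set Int),
      n ∈ (nums.foldl is_pluralStep (u, d)).2 ↔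
        n ∈ d ∨ (n ∈ u ∧ n ∈ nums) ∨ 2 ≤ nums.count n := by
  intro nums
  induction nums with
  | nil => intro u d; simp
  | cons x rest ih =>
    intro u d
    rw [List.foldl_cons]
    have hm := mem_iff_one_le_count rest n
    by_cases hx : x ∈ u
    · rw [is_pluralStep_pos u d x hx, ih, PySem.Set.mem_add d x n]
      by_cases hnx : n = x
      · constructor
        · intro _
          exact Or.inr (Or.inl ⟨hnx ▸ hx, by rw [hnx]; exact List.mem_cons_self⟩)
        · intro _
          exact Or.inl (Or.inr hnx)
      · have hxn : ¬ x = n := fun h => hnx h.symm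
        have hcount : (x :: rest).count n = rest.count n := by simp [hxn]
        have hmem : n ∈ x :: rest ↔ n ∈ rest := by simp [hnx]
        rw [hcount, hmem]
        tauto
    · rw [is_pluralStep_neg u d x hx, ih, PySem.Set.mem_add u x n]
      by_cases hnx : n = x
      · subst hnx
        have hcount : (n :: rest).count n = rest.count n + 1 := by simp
        rw [hcount]
        constructor
        · rintro (hd | ⟨_, hr⟩ | h2)
          · exact Or.inl hd
          · exact Or.inr (Or.inr (by have := hm.mp hr; omega))
          · exact Or.inr (Or.inr (by omega))
        · rintro (hd | ⟨hu, _⟩ | h2)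
          · exact Or.inl hd
          · exact absurd hu hx
          · exact Or.inr (Or.inl ⟨Or.inr rfl, hm.mpr (by omega)⟩)
      · have hxn : ¬ x = n := fun h => hnx h.symm
        have hcount : (x :: rest).count n = rest.count n := by simp [hxn]
        have hmem : n ∈ x :: rest ↔ n ∈ rest := by simp [hnx]
        rw [hcount, hmem]
        tauto

-- A's value is "n occurs at least twice"
theorem is_plural_eq_count (nums : List Int) (n : Int) :
    is_plural nums n = decide (2 ≤ nums.count n) := by
  unfold is_plural
  have h := is_plural_loop_inv n nums PySem.Set.empty PySem.Set.empty
  simp only [PySem.Set.empty, List.not_mem_nil, false_and, false_or] at h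
  simp only [PySem.Set.contains, List.contains_eq_mem, decide_eq_decide]
  exact h

-- B's value is the same predicate
theorem is_plural_alt_eq_count (nums : List Int) (n : Int) :
    is_plural_alt nums n = decide (2 ≤ nums.count n) := by
  unfold is_plural_alt
  rcases hidx : PySem.List.index? nums n with _ | k
  · have hnot : n ∉ nums := (PySem.List.index?_eq_none_iff nums n).1 hidx
    have : nums.count n = 0 := List.count_eq_zero.2 hnot
    simp [this]
  · obtain ⟨pre, suf, hsplit, hlen, hnp⟩ := (PySem.List.index?_eq_some_iff nums n k).1 hidx
    have hslice : PySem.List.slice nums (some ((k : Int) + 1)) none = nums.drop (k + 1) := by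
      have : ((k : Int) + 1) = ((k + 1 : Nat) : Int) := by push_cast; ring
      rw [this, PySem.List.slice_from_natCast]
    show (PySem.List.slice nums (some ((k : Int) + 1)) none).contains n = _
    rw [hslice, hsplit]
    have hdrop : (pre ++ n :: suf).drop (k + 1) = suf := by
      subst hlen
      simp [List.drop_append]
    have hcount : (pre ++ n :: suf).count n = suf.count n + 1 := by
      simp [List.count_append, List.count_eq_zero.2 hnp]
    rw [hdrop, hcount]
    simp only [List.contains_eq_mem, decide_eq_decide]
    rw [mem_iff_one_le_count]
    omega

-- ===== VERDICT (by name: the statement is the Claim_ definition above) =====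
theorem is_plural_spec : Claim_equal_is_plural := by
  intro nums n _
  unfold Spec_is_plural
  rw [is_plural_eq_count, is_plural_alt_eq_count]
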